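-- pv_equiv track=rewrite | github.com/varshaajio/LeetCode | solutions/4013-merge-close-characters/solution.py | mergeCharacters
-- ===== SOURCE A (Python) =====
-- def mergeCharacters(s: str, k: int) -> str:
--     flag=True
--     while flag:
--         flag=False
--         i=0
--         s1=set()
--         for e in s:
--             if e not in s1:
--                 s1.add(e)
--             else:
--                 if i-s.rfind(e,0,i)<=k:
--                     flag=True
--                     s=s[:i]+s[i+1:]
--             if flag==True:
--                 break
--             i+=1
--     return s
-- ===== SOURCE B (Python) =====
-- def mergeCharacters(s: str, k: int) -> str:
--     # Single pass: drop a character when its distance to the last kept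
--     # occurrence of the same character is <= k; otherwise keep it and
--     # record its position in the growing result.
--     res = []
--     last = {}
--     for c in s:
--         j = last.get(c)
--         if j is not None and len(res) - j <= k:
--             continue
--         last[c] = len(res)
--         res.append(c)
--     return ''.join(res)
-- ===== Notes on version B (the rewrite author's own statement) =====
-- stated objective: faster
-- what changed: Replaced the restart-the-whole-scan-after-each-removal loop (with an rfind rescan per character) by a single left-to-right pass that keeps a dict from character to its last kept position, dropping a character when the gap to that position is <= k.
import Mathlib
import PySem

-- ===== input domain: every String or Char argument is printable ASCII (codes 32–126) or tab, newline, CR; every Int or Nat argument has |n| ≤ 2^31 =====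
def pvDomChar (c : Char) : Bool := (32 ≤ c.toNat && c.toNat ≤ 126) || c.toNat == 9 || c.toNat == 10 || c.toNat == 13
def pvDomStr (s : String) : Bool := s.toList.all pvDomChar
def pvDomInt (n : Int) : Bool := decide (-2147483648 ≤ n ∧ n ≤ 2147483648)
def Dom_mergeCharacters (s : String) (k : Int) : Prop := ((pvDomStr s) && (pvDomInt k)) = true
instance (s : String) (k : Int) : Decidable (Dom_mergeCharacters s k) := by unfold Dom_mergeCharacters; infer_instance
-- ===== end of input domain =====

-- B replaces A's restart-after-every-removal rescan (many passes, each calling rfind)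
-- by one left-to-right pass with a dict of each character's last kept position;
-- objective: faster (asymptotic).

-- ===== PORT A =====
-- the inner 'for e in s' loop of one iteration of A's while-loop: returns the index i
-- at which A removes a character (and sets flag), or none if the pass finds nothing.
def scanA (l : List Char) (k : Int) : Nat → PySem.Set Char → List Char → Option Nat
  | _, _, [] => none
  | i, s1, e :: rest =>
    if PySem.Set.contains s1 e then
      -- e already in s1: 'if i - s.rfind(e, 0, i) <= k: flag=True; remove; break'
      if (i : Int) - PySem.Chars.rfindFrom l [e] 0 (some (i : Int)) ≤ k then some i
      else scanA l k (i + 1) s1 rest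
    else scanA l k (i + 1) (PySem.Set.add s1 e) rest

-- termination helper for A's while-loop (each flagged pass removes one character)
theorem scanA_lt (l : List Char) (k : Int) :
    ∀ (suf : List Char) (i : Nat) (s1 : PySem.Set Char) (j : Nat),
      scanA l k i s1 suf = some j → j < i + suf.length := by
  intro suf
  induction suf with
  | nil => intro i s1 j h; simp [scanA] at h
  | cons a rest ih =>
    intro i s1 j h
    simp only [scanA] at h
    by_cases hc : PySem.Set.contains s1 a = true
    · rw [if_pos hc] at h
      by_cases hk : (i : Int) - PySem.Chars.rfindFrom l [a] 0 (some (i : Int)) ≤ k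
      · rw [if_pos hk] at h
        injection h with h
        simp only [List.length_cons]; omega
      · rw [if_neg hk] at h
        have := ih (i + 1) s1 j h
        simp only [List.length_cons]; omega
    · rw [if_neg hc] at h
      have := ih (i + 1) (PySem.Set.add s1 a) j h
      simp only [List.length_cons]; omega

-- A's while-loop: rescan from scratch after each removal, stop when a pass is clean
def loopA (k : Int) (l : List Char) : List Char :=
  match _h : scanA l k 0 PySem.Set.empty l with
  | none => l
  | some i => loopA k (l.take i ++ l.drop (i + 1))
termination_by l.length
decreasing_by
  have := scanA_lt l k l 0 PySem.Set.empty i _h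
  simp only [List.length_append, List.length_take, List.length_drop]
  omega

def mergeCharacters (s : String) (k : Int) : String := String.mk (loopA k s.toList)

-- ===== PORT B =====
-- one step of B's single pass: state = (kept characters, char ↦ its last kept position)
def stepB (k : Int) (st : List Char × PySem.Dict Char Int) (c : Char) :
    List Char × PySem.Dict Char Int :=
  match PySem.Dict.get? st.2 c with
  | some j =>
      if (st.1.length : Int) - j ≤ k then st
      else (st.1 ++ [c], PySem.Dict.insert st.2 c (st.1.length : Int))
  | none => (st.1 ++ [c], PySem.Dict.insert st.2 c (st.1.length : Int))

def mergeCharacters_alt (s : String) (k : Int) : String :=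
  String.mk (s.toList.foldl (stepB k) ([], PySem.Dict.empty)).1

-- ===== PRECONDITION & SPEC =====
def Spec_mergeCharacters (s : String) (k : Int) (out : String) : Prop := out = mergeCharacters_alt s k
instance (s : String) (k : Int) (out : String) : Decidable (Spec_mergeCharacters s k out) := by unfold Spec_mergeCharacters; infer_instance

-- ===== CLAIM (what is proved, stated in full; the proofs are below) =====
def Claim_equal_mergeCharacters : Prop := ∀ (s : String) (k : Int), Dom_mergeCharacters s k → Spec_mergeCharacters s k (mergeCharacters s k)

-- ===== LEMMAS AND PROOFS =====

-- last index j ≤ m with p[j] = e, as an Int (-1 if none) — the value rfind(e,0,m+1) computes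
def lastIdxBelow (p : List Char) (e : Char) : Nat → Int
  | 0 => if p[0]? = some e then 0 else -1
  | j + 1 => if p[j + 1]? = some e then ((j + 1 : Nat) : Int) else lastIdxBelow p e j

-- last index of e in p (the value of A's rfind(e, 0, len p)), -1 if absent
def lastIdx (p : List Char) (e : Char) : Int := lastIdxBelow p e p.length

theorem isPrefixOf_single (e : Char) (l : List Char) :
    [e].isPrefixOf l = (l[0]? == some e) := by
  cases l with
  | nil => simp [List.isPrefixOf]
  | cons b t => simp [List.isPrefixOf, eq_comm]

theorem rfind_go_eq (p : List Char) (e : Char) :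
    ∀ m, PySem.Chars.rfind.go p [e] m = lastIdxBelow p e m := by
  intro m
  induction m with
  | zero => simp [PySem.Chars.rfind.go, lastIdxBelow, isPrefixOf_single]
  | succ j ih =>
    rw [PySem.Chars.rfind.go, lastIdxBelow, isPrefixOf_single]
    simp only [List.getElem?_drop, Nat.add_zero]
    rw [ih]
    rcases h : p[j + 1]? with _ | c <;> simp [h]

theorem lastIdxBelow_append (p q : List Char) (e : Char) :
    ∀ m, m < p.length → lastIdxBelow (p ++ q) e m = lastIdxBelow p e m := by
  intro m
  induction m with
  | zero => intro h; simp [lastIdxBelow, List.getElem?_append_left h]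
  | succ j ih =>
    intro h
    simp [lastIdxBelow, List.getElem?_append_left h, ih (by omega)]

theorem lastIdx_append (p : List Char) (a e : Char) :
    lastIdx (p ++ [a]) e = if a = e then (p.length : Int) else lastIdx p e := by
  unfold lastIdx
  have hlen : (p ++ [a]).length = p.length + 1 := by simp
  rw [hlen, lastIdxBelow]
  have h1 : (p ++ [a])[p.length + 1]? = none := by simp
  rw [h1]
  have h2 : (p ++ [a])[p.length]? = some a := by simp
  cases hp : p.length with
  | zero =>
    have hpnil : p = [] := List.eq_nil_of_length_eq_zero hp
    subst hpnil
    simp only [lastIdxBelow, List.nil_append, List.getElem?_cons_zero]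
    by_cases hae : a = e
    · simp [hae]
    · simp [hae]
  | succ j =>
    rw [lastIdxBelow]
    rw [hp] at h2
    rw [h2]
    have h3 : lastIdxBelow (p ++ [a]) e j = lastIdxBelow p e j :=
      lastIdxBelow_append p [a] e j (by omega)
    have h4 : lastIdxBelow p e (j + 1) = lastIdxBelow p e j := by
      rw [lastIdxBelow]
      have : p[j + 1]? = none := by rw [List.getElem?_eq_none_iff]; omega
      simp [this]
    rw [h3, ← hp, ← h4, hp]
    by_cases hae : a = e
    · simp [hae]
    · simp [hae]

-- the rfind call A makes at position pre.length of the string pre ++ suf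
theorem rfindFrom_pre (pre suf : List Char) (e : Char) :
    PySem.Chars.rfindFrom (pre ++ suf) [e] 0 (some (pre.length : Int)) = lastIdx pre e := by
  unfold PySem.Chars.rfindFrom
  have hn : ¬ ((((pre ++ suf).length : Int)) < (pre.length : Int)) := by simp
  simp only [hn, if_false]
  have hp : ¬ ((pre.length : Int) < 0) := by omega
  simp only [hp, if_false]
  have h0 : ¬ ((0 : Int) < 0) := by omega
  simp only [h0, if_false]
  have hdrop : List.drop (Int.toNat (0 : Int)) (List.take (Int.toNat (pre.length : Int)) (pre ++ suf)) = pre := by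
    simp
  rw [hdrop]
  unfold PySem.Chars.rfind
  rw [rfind_go_eq]
  unfold lastIdx
  by_cases h : lastIdxBelow pre e pre.length = -1 <;> simp [h, hp]

-- the invariant linking A's scan state to B's fold state while nothing has been dropped:
-- walking suf from position pre.length with s1 = the chars of pre and d = last indices in pre
theorem walk (k : Int) :
    ∀ (suf pre : List Char) (s1 : PySem.Set Char) (d : PySem.Dict Char Int),
      (∀ c, c ∈ s1 ↔ c ∈ pre) →
      (∀ c, PySem.Dict.get? d c = if c ∈ pre then some (lastIdx pre c) else none) →
      (match scanA (pre ++ suf) k pre.length s1 suf with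
       | none => (List.foldl (stepB k) (pre, d) suf).1 = pre ++ suf
       | some i => ∃ s2 a s3, suf = s2 ++ a :: s3 ∧ i = pre.length + s2.length ∧
           List.foldl (stepB k) (pre, d) suf = List.foldl (stepB k) (pre, d) (s2 ++ s3)) := by
  intro suf
  induction suf with
  | nil => intro pre s1 d hs hd; simp [scanA]
  | cons a rest ih =>
    intro pre s1 d hs hd
    have hstep : stepB k (pre, d) a =
        if (a ∈ pre ∧ (pre.length : Int) - lastIdx pre a ≤ k) then (pre, d)
        else (pre ++ [a], PySem.Dict.insert d a (pre.length : Int)) := by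
      unfold stepB
      rw [hd a]
      by_cases hm : a ∈ pre
      · simp only [hm, if_true]
        by_cases hk : (pre.length : Int) - lastIdx pre a ≤ k <;> simp [hk]
      · simp [hm]
    have hd' : ∀ c, PySem.Dict.get? (PySem.Dict.insert d a (pre.length : Int)) c =
        if c ∈ pre ++ [a] then some (lastIdx (pre ++ [a]) c) else none := by
      intro c
      rw [PySem.Dict.get?_insert, hd c, lastIdx_append]
      by_cases hca : c = a
      · subst hca; simp
      · have hac : ¬ (a = c) := fun h => hca h.symm
        by_cases hcp : c ∈ pre <;> simp [hca, hac, hcp]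
    by_cases hmem : a ∈ s1
    · have hain : a ∈ pre := (hs a).mp hmem
      have hc : PySem.Set.contains s1 a = true := (PySem.Set.contains_iff s1 a).mpr hmem
      by_cases hk : (pre.length : Int) - PySem.Chars.rfindFrom (pre ++ a :: rest) [a] 0 (some (pre.length : Int)) ≤ k
      · -- A removes at position pre.length; B drops a
        have hscan : scanA (pre ++ a :: rest) k pre.length s1 (a :: rest) = some pre.length := by
          simp only [scanA]
          rw [if_pos hc, if_pos hk]
        rw [hscan]
        refine ⟨[], a, rest, by simp, by simp, ?_⟩
        have hk' : (pre.length : Int) - lastIdx pre a ≤ k := by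
          rwa [rfindFrom_pre pre (a :: rest) a] at hk
        simp only [List.foldl_cons, List.nil_append]
        rw [hstep]
        simp [hain, hk']
      · -- both keep a; recurse with pre ++ [a]
        have hscan : scanA (pre ++ a :: rest) k pre.length s1 (a :: rest) =
            scanA (pre ++ a :: rest) k (pre.length + 1) s1 rest := by
          simp only [scanA]
          rw [if_pos hc, if_neg hk]
        have hk' : ¬ ((pre.length : Int) - lastIdx pre a ≤ k) := by
          rwa [rfindFrom_pre pre (a :: rest) a] at hk
        have hstep' : stepB k (pre, d) a = (pre ++ [a], PySem.Dict.insert d a (pre.length : Int)) := by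
          rw [hstep]; simp [hk']
        have hs' : ∀ c, c ∈ s1 ↔ c ∈ pre ++ [a] := by
          intro c
          rw [hs c]
          simp only [List.mem_append, List.mem_singleton]
          constructor
          · exact Or.inl
          · rintro (h | rfl)
            · exact h
            · exact hain
        have hih := ih (pre ++ [a]) s1 (PySem.Dict.insert d a (pre.length : Int)) hs' hd'
        rw [List.append_assoc] at hih
        simp only [List.singleton_append] at hih
        have hlen : (pre ++ [a]).length = pre.length + 1 := by simp
        rw [hlen] at hih
        rw [hscan]
        rcases hres : scanA (pre ++ a :: rest) k (pre.length + 1) s1 rest with _ | i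
        · rw [hres] at hih
          simp only [List.foldl_cons]
          rw [hstep', hih]
        · rw [hres] at hih
          obtain ⟨s2, b, s3, hrest, hi, heq⟩ := hih
          refine ⟨a :: s2, b, s3, by simp [hrest], by simp only [List.length_cons]; omega, ?_⟩
          simp only [List.cons_append, List.foldl_cons]
          rw [hstep', heq]
    · -- a not yet seen: A adds it to s1, B appends it; recurse with pre ++ [a]
      have hanin : a ∉ pre := fun h => hmem ((hs a).mpr h)
      have hc : ¬ (PySem.Set.contains s1 a = true) := fun h =>
        hmem ((PySem.Set.contains_iff s1 a).mp h)
      have hscan : scanA (pre ++ a :: rest) k pre.length s1 (a :: rest) =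
          scanA (pre ++ a :: rest) k (pre.length + 1) (PySem.Set.add s1 a) rest := by
        simp only [scanA]
        rw [if_neg hc]
      have hstep' : stepB k (pre, d) a = (pre ++ [a], PySem.Dict.insert d a (pre.length : Int)) := by
        rw [hstep]; simp [hanin]
      have hs' : ∀ c, c ∈ PySem.Set.add s1 a ↔ c ∈ pre ++ [a] := by
        intro c
        rw [PySem.Set.mem_add, hs c]
        simp only [List.mem_append, List.mem_singleton]
      have hih := ih (pre ++ [a]) (PySem.Set.add s1 a) (PySem.Dict.insert d a (pre.length : Int)) hs' hd'
      rw [List.append_assoc] at hih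
      simp only [List.singleton_append] at hih
      have hlen : (pre ++ [a]).length = pre.length + 1 := by simp
      rw [hlen] at hih
      rw [hscan]
      rcases hres : scanA (pre ++ a :: rest) k (pre.length + 1) (PySem.Set.add s1 a) rest with _ | i
      · rw [hres] at hih
        simp only [List.foldl_cons]
        rw [hstep', hih]
      · rw [hres] at hih
        obtain ⟨s2, b, s3, hrest, hi, heq⟩ := hih
        refine ⟨a :: s2, b, s3, by simp [hrest], by simp only [List.length_cons]; omega, ?_⟩
        simp only [List.cons_append, List.foldl_cons]
        rw [hstep', heq]

theorem loopA_eq (k : Int) : ∀ (l : List Char),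
    loopA k l = (l.foldl (stepB k) ([], PySem.Dict.empty)).1 := by
  intro l
  induction hn : l.length using Nat.strong_induction_on generalizing l with
  | _ n ih =>
  subst hn
  rw [loopA]
  have hwalk := walk k l [] PySem.Set.empty PySem.Dict.empty
    (by intro c; simp [PySem.Set.empty])
    (by intro c; simp [PySem.Dict.get?_empty])
  simp only [List.nil_append, List.length_nil, Nat.zero_add] at hwalk
  split
  · rename_i hscan
    rw [hscan] at hwalk
    exact hwalk.symm
  · rename_i i hscan
    rw [hscan] at hwalk
    obtain ⟨s2, a, s3, hl, hi, heq⟩ := hwalk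
    have hrw : l.take i ++ l.drop (i + 1) = s2 ++ s3 := by
      subst hl hi
      have h1 : List.take s2.length (s2 ++ a :: s3) = s2 := by simp
      have h2 : List.drop (s2.length + 1) (s2 ++ a :: s3) = s3 := by
        have hl1 : s2.length + 1 = (s2 ++ [a]).length := by simp
        rw [hl1, show s2 ++ a :: s3 = (s2 ++ [a]) ++ s3 by simp, List.drop_left]
      rw [h1, h2]
    have hlt : (s2 ++ s3).length < l.length := by
      subst hl; simp
    rw [hrw, ih _ hlt _ rfl, ← heq]

-- ===== VERDICT (by name: the statement is the Claim_ definition above) =====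
theorem mergeCharacters_spec : Claim_equal_mergeCharacters := by
  intro s k _
  unfold Spec_mergeCharacters mergeCharacters mergeCharacters_alt
  rw [loopA_eq]
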